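-- pv_equiv track=rewrite | github.com/rrobisaacjr/8Puzzle | 8PuzzleBFSDFS/dfs.py | actions
-- ===== SOURCE A (Python) =====
-- def actions(state):
--     # Find the position of the empty cell
--     empty_pos = None
--     for i in range(3):
--         for j in range(3):
--             if state[i][j] == "":
--                 empty_pos = (i, j)
--                 break
--         if empty_pos:
--             break
--
--     # Define the possible actions based on the empty cell's position
--     possible_actions = []
--     i, j = empty_pos
--
--     if i > 0:  # Can move Up
--         possible_actions.append("U")
--     if j < 2:  # Can move Right
--         possible_actions.append("R")
--     if i < 2:  # Can move Down
--         possible_actions.append("D")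
--     if j > 0:  # Can move Left
--         possible_actions.append("L")
--
--
--     return possible_actions
-- ===== SOURCE B (Python) =====
-- def actions(state):
--     # Precomputed lookup: each of the 9 possible blank positions maps to its
--     # fixed move list; locating the blank is one index() into the flattened board.
--     MOVES = (["R", "D"], ["R", "D", "L"], ["D", "L"],
--              ["U", "R", "D"], ["U", "R", "D", "L"], ["U", "D", "L"],
--              ["U", "R"], ["U", "R", "L"], ["U", "L"])
--     flat = [cell for row in state[:3] for cell in row[:3]]
--     return list(MOVES[flat.index("")])
-- ===== Notes on version B (the rewrite author's own statement) =====
-- stated objective: alternative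
-- what changed: Replaces A's nested break-out search loops plus four boundary tests by a precomputed 9-entry lookup table indexed by the blank's flattened position, so no coordinate arithmetic or boundary checks remain.
import Mathlib
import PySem

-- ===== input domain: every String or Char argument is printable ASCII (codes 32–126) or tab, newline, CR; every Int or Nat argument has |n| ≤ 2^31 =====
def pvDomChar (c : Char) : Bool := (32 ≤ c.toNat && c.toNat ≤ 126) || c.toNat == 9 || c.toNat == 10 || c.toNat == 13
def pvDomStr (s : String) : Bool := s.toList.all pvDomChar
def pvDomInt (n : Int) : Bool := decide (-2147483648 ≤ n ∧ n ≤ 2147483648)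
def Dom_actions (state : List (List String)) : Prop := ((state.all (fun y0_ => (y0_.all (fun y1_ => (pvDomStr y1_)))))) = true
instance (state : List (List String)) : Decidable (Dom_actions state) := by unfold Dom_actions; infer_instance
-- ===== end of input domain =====

-- B replaces A's nested break-loops and four boundary ifs by one flatten+index blank lookup
-- into a precomputed 9-entry move table (objective: alternative; return value only).


-- ===== PORT A =====
-- inner loop: 'for j in range(3): if state[i][j] == "": empty_pos = (i, j); break'
def pvRowScanA (row : List String) : Option Int :=
  (List.range 3).foldl (fun acc j =>
    match acc with
    | some _ => acc   -- the inner loop already broke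
    | none => if PySem.List.pyGet? row (j : Int) = some "" then some (j : Int) else none) none

-- outer loop: 'for i in range(3): …; if empty_pos: break'  (a found (i, j) tuple is always truthy)
def pvFindA (state : List (List String)) : Option (Int × Int) :=
  (List.range 3).foldl (fun acc i =>
    match acc with
    | some _ => acc   -- the outer loop already broke
    | none =>
      match PySem.List.pyGet? state (i : Int) with
      | none => none  -- IndexError in Python; excluded by Pre_actions
      | some row => (pvRowScanA row).map (fun j => ((i : Int), j))) none

def actions (state : List (List String)) : List String :=
  match pvFindA state with
  | none => []  -- Python raises TypeError unpacking None here; excluded by Pre_actions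
  | some (i, j) =>
    let ps : List String := []
    let ps := if 0 < i then ps ++ ["U"] else ps
    let ps := if j < 2 then ps ++ ["R"] else ps
    let ps := if i < 2 then ps ++ ["D"] else ps
    let ps := if 0 < j then ps ++ ["L"] else ps
    ps

-- ===== PORT B =====
-- the MOVES tuple of Source B
def pvMovesTable : List (List String) :=
  [["R", "D"], ["R", "D", "L"], ["D", "L"],
   ["U", "R", "D"], ["U", "R", "D", "L"], ["U", "D", "L"],
   ["U", "R"], ["U", "R", "L"], ["U", "L"]]

def actions_alt (state : List (List String)) : List String :=
  let flat := (PySem.List.slice state none (some 3)).flatMap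
                (fun row => PySem.List.slice row none (some 3))
  match PySem.List.index? flat "" with
  | none => []  -- Python raises ValueError here; excluded by Pre_actions
  | some k =>
    match PySem.List.pyGet? pvMovesTable (k : Int) with
    | none => []  -- IndexError; unreachable: k ≤ 8 since flat has at most 9 cells
    | some ms => ms

-- ===== PRECONDITION & SPEC =====
-- Pre_ holds exactly when A's row-major scan reaches a blank: some row i < 3 exists, has a blank
-- among its first three cells, and every earlier row has at least three cells none of which is
-- blank. Outside Pre_ A raises (TypeError unpacking None, or IndexError on a short row).
def Pre_actions (state : List (List String)) : Prop :=
  ∃ i, i < 3 ∧ i < state.length ∧ "" ∈ (state.getD i []).take 3 ∧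
    ∀ i' < i, 3 ≤ (state.getD i' []).length ∧ "" ∉ (state.getD i' []).take 3
instance (state : List (List String)) : Decidable (Pre_actions state) := by
  unfold Pre_actions; infer_instance

def pvWitness_actions : List (List String) :=
  [["1", "2", ""], ["3", "4", "5"], ["6", "7", "8"]]

def Spec_actions (state : List (List String)) (out : List String) : Prop := out = actions_alt state
instance (state : List (List String)) (out : List String) : Decidable (Spec_actions state out) := by
  unfold Spec_actions; infer_instance

-- ===== CLAIM (what is proved, stated in full; the proofs are below) =====
def Claim_equal_actions : Prop :=
  ∀ (state : List (List String)), Dom_actions state → Pre_actions state →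
    Spec_actions state (actions state)

-- ===== LEMMAS AND PROOFS =====
-- xs[1] and xs[2] on lists with enough visible head cells (numeral indices, so the natCast
-- bridge lemmas do not fire)
lemma pg1 {α : Type} (x y : α) (t : List α) : PySem.List.pyGet? (x::y::t) (1:Int) = some y := by
  rw [show ((x::y::t) : List α) = [x] ++ y::t from rfl,
      show (1:Int) = (([x] : List α).length : Int) by simp,
      PySem.List.pyGet?_append_length]
lemma pg2 {α : Type} (x y z : α) (t : List α) : PySem.List.pyGet? (x::y::z::t) (2:Int) = some z := by
  rw [show ((x::y::z::t) : List α) = [x,y] ++ z::t from rfl,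
      show (2:Int) = (([x,y] : List α).length : Int) by simp,
      PySem.List.pyGet?_append_length]

lemma tbl0 : PySem.List.pyGet? pvMovesTable (0:Int) = some ["R","D"] := by decide
lemma tbl1 : PySem.List.pyGet? pvMovesTable (1:Int) = some ["R","D","L"] := by decide
lemma tbl2 : PySem.List.pyGet? pvMovesTable (2:Int) = some ["D","L"] := by decide
lemma tbl3 : PySem.List.pyGet? pvMovesTable (3:Int) = some ["U","R","D"] := by decide
lemma tbl4 : PySem.List.pyGet? pvMovesTable (4:Int) = some ["U","R","D","L"] := by decide
lemma tbl5 : PySem.List.pyGet? pvMovesTable (5:Int) = some ["U","D","L"] := by decide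
lemma tbl6 : PySem.List.pyGet? pvMovesTable (6:Int) = some ["U","R"] := by decide
lemma tbl7 : PySem.List.pyGet? pvMovesTable (7:Int) = some ["U","R","L"] := by decide
lemma tbl8 : PySem.List.pyGet? pvMovesTable (8:Int) = some ["U","L"] := by decide

-- blank first reachable in row 0: both ports agree whatever the later rows are
theorem blank_row0 (r : List String) (rest : List (List String))
    (hb : "" ∈ r.take 3) :
    actions (r :: rest) = actions_alt (r :: rest) := by
  match r, hb with
  | d0 :: t, hb =>
    by_cases e0 : d0 = ""
    · simp [actions, actions_alt, pvFindA, pvRowScanA, List.range_succ, PySem.List.slice_to, List.idxOf?, List.findIdx?, List.findIdx?.go, tbl0, tbl1, tbl2, tbl3, tbl4, tbl5, tbl6, tbl7, tbl8, e0]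
    match t, hb with
    | d1 :: t1, hb =>
      by_cases e1 : d1 = ""
      · simp [actions, actions_alt, pvFindA, pvRowScanA, List.range_succ, PySem.List.slice_to, List.idxOf?, List.findIdx?, List.findIdx?.go, tbl0, tbl1, tbl2, tbl3, tbl4, tbl5, tbl6, tbl7, tbl8, e0, e1]
      match t1, hb with
      | d2 :: t2, hb =>
        by_cases e2 : d2 = ""
        · simp [actions, actions_alt, pvFindA, pvRowScanA, List.range_succ, pg1, pg2, PySem.List.slice_to, List.idxOf?, List.findIdx?, List.findIdx?.go, tbl0, tbl1, tbl2, tbl3, tbl4, tbl5, tbl6, tbl7, tbl8, e0, e1, e2]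
        · simp [List.take, e0, e1, e2] at hb
      | [], hb => simp [List.take, e0, e1] at hb
    | [], hb => simp [List.take, e0] at hb
  | [], hb => simp at hb

-- row 0 is fully scanned (three non-blank cells), blank first reachable in row 1
theorem blank_row1 (p0 p1 p2 : String) (t0 : List String) (r : List String)
    (rest : List (List String)) (q0 : p0 ≠ "") (q1 : p1 ≠ "") (q2 : p2 ≠ "")
    (hb : "" ∈ r.take 3) :
    actions ((p0::p1::p2::t0) :: r :: rest) = actions_alt ((p0::p1::p2::t0) :: r :: rest) := by
  match r, hb with
  | d0 :: t, hb =>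
    by_cases e0 : d0 = ""
    · simp [actions, actions_alt, pvFindA, pvRowScanA, List.range_succ, pg1, pg2, PySem.List.slice_to, List.idxOf?, List.findIdx?, List.findIdx?.go, tbl0, tbl1, tbl2, tbl3, tbl4, tbl5, tbl6, tbl7, tbl8, q0, q1, q2, e0]
    match t, hb with
    | d1 :: t1, hb =>
      by_cases e1 : d1 = ""
      · simp [actions, actions_alt, pvFindA, pvRowScanA, List.range_succ, pg1, pg2, PySem.List.slice_to, List.idxOf?, List.findIdx?, List.findIdx?.go, tbl0, tbl1, tbl2, tbl3, tbl4, tbl5, tbl6, tbl7, tbl8, q0, q1, q2, e0, e1]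
      match t1, hb with
      | d2 :: t2, hb =>
        by_cases e2 : d2 = ""
        · simp [actions, actions_alt, pvFindA, pvRowScanA, List.range_succ, pg1, pg2, PySem.List.slice_to, List.idxOf?, List.findIdx?, List.findIdx?.go, tbl0, tbl1, tbl2, tbl3, tbl4, tbl5, tbl6, tbl7, tbl8, q0, q1, q2, e0, e1, e2]
        · simp [List.take, e0, e1, e2] at hb
      | [], hb => simp [List.take, e0, e1] at hb
    | [], hb => simp [List.take, e0] at hb
  | [], hb => simp at hb

-- rows 0 and 1 fully scanned, blank first reachable in row 2
theorem blank_row2 (p0 p1 p2 u0 u1 u2 : String) (t0 t1 : List String) (r : List String)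
    (rest : List (List String)) (q0 : p0 ≠ "") (q1 : p1 ≠ "") (q2 : p2 ≠ "")
    (s0 : u0 ≠ "") (s1 : u1 ≠ "") (s2 : u2 ≠ "") (hb : "" ∈ r.take 3) :
    actions ((p0::p1::p2::t0) :: (u0::u1::u2::t1) :: r :: rest)
      = actions_alt ((p0::p1::p2::t0) :: (u0::u1::u2::t1) :: r :: rest) := by
  match r, hb with
  | d0 :: t, hb =>
    by_cases e0 : d0 = ""
    · simp [actions, actions_alt, pvFindA, pvRowScanA, List.range_succ, pg1, pg2, PySem.List.slice_to, List.idxOf?, List.findIdx?, List.findIdx?.go, tbl0, tbl1, tbl2, tbl3, tbl4, tbl5, tbl6, tbl7, tbl8, q0, q1, q2, s0, s1, s2, e0]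
    match t, hb with
    | d1 :: t1, hb =>
      by_cases e1 : d1 = ""
      · simp [actions, actions_alt, pvFindA, pvRowScanA, List.range_succ, pg1, pg2, PySem.List.slice_to, List.idxOf?, List.findIdx?, List.findIdx?.go, tbl0, tbl1, tbl2, tbl3, tbl4, tbl5, tbl6, tbl7, tbl8, q0, q1, q2, s0, s1, s2, e0, e1]
      match t1, hb with
      | d2 :: t2, hb =>
        by_cases e2 : d2 = ""
        · simp [actions, actions_alt, pvFindA, pvRowScanA, List.range_succ, pg1, pg2, PySem.List.slice_to, List.idxOf?, List.findIdx?, List.findIdx?.go, tbl0, tbl1, tbl2, tbl3, tbl4, tbl5, tbl6, tbl7, tbl8, q0, q1, q2, s0, s1, s2, e0, e1, e2]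
        · simp [List.take, e0, e1, e2] at hb
      | [], hb => simp [List.take, e0, e1] at hb
    | [], hb => simp [List.take, e0] at hb
  | [], hb => simp at hb

-- ===== VERDICT (by name: the statement is the Claim_ definition above) =====
theorem actions_spec : Claim_equal_actions := by
  intro state hdom hpre
  obtain ⟨i, hi3, hilen, hbl, hprev⟩ := hpre
  match i, hi3 with
  | 0, _ =>
    match state, hilen with
    | r0 :: rest, _ => exact blank_row0 r0 rest hbl
  | 1, _ =>
    match state, hilen with
    | r0 :: r1 :: rest, _ =>
      obtain ⟨hl0, hn0⟩ := hprev 0 (by omega)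
      match r0, hl0 with
      | p0 :: p1 :: p2 :: t0, _ =>
        simp only [List.getD_cons_zero, List.take, List.mem_cons, List.not_mem_nil, or_false,
          not_or] at hn0
        exact blank_row1 p0 p1 p2 t0 r1 rest (Ne.symm hn0.1) (Ne.symm hn0.2.1)
          (Ne.symm hn0.2.2) hbl
  | 2, _ =>
    match state, hilen with
    | r0 :: r1 :: r2 :: rest, _ =>
      obtain ⟨hl0, hn0⟩ := hprev 0 (by omega)
      obtain ⟨hl1, hn1⟩ := hprev 1 (by omega)
      match r0, hl0, r1, hl1 with
      | p0 :: p1 :: p2 :: t0, _, u0 :: u1 :: u2 :: t1, _ =>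
        simp only [List.getD_cons_zero, List.getD_cons_succ, List.take, List.mem_cons,
          List.not_mem_nil, or_false, not_or] at hn0 hn1
        exact blank_row2 p0 p1 p2 u0 u1 u2 t0 t1 r2 rest (Ne.symm hn0.1) (Ne.symm hn0.2.1)
          (Ne.symm hn0.2.2) (Ne.symm hn1.1) (Ne.symm hn1.2.1) (Ne.symm hn1.2.2) hbl
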